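-- pv_equiv track=rewrite | github.com/SeaPickle755/conway-image-generator | RLE encode.py | create_pixel_art_grid
-- ===== SOURCE A (Python) =====
-- from typing import List, Tuple, Dict
--
-- def create_pixel_art_grid(
--     pixel_art_map: List[List[str]],
--     base_pattern: List[List[str]]
-- ) -> List[List[str]]:
--     """
--     Creates a large grid by tiling a base pattern only where the
--     pixel_art_map indicates an 'alive' cell ('o'). (Reused from previous turn).
--     """
--     if not base_pattern or not base_pattern[0] or not pixel_art_map:
--         return []
--
--     base_height = len(base_pattern)
--     base_width = len(base_pattern[0])
--     map_height = len(pixel_art_map)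
--     map_width = len(pixel_art_map[0])
--
--     new_height = map_height * base_height
--     new_width = map_width * base_width
--
--     new_grid = [['.' for _ in range(new_width)] for _ in range(new_height)]
--
--     for map_r in range(map_height):
--         for map_c in range(map_width):
--             if pixel_art_map[map_r][map_c] == 'o':
--                 start_row = map_r * base_height
--                 start_col = map_c * base_width
--
--                 # Copy the base pattern into the tile area
--                 for r in range(base_height):
--                     for c in range(base_width):
--                         new_row = start_row + r
--                         new_col = start_col + c
--                         # Only copy the alive cells from the base pattern
--                         if base_pattern[r][c] == 'o':
--                             new_grid[new_row][new_col] = 'o'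
--
--     return new_grid
-- ===== SOURCE B (Python) =====
-- from typing import List
--
--
-- def create_pixel_art_grid(
--     pixel_art_map: List[List[str]],
--     base_pattern: List[List[str]]
-- ) -> List[List[str]]:
--     """Build the tiled grid directly in output order, one row at a time."""
--     if not base_pattern or not base_pattern[0] or not pixel_art_map:
--         return []
--
--     base_height = len(base_pattern)
--     base_width = len(base_pattern[0])
--     map_width = len(pixel_art_map[0])
--
--     out = []
--     for new_r in range(len(pixel_art_map) * base_height):
--         map_row = pixel_art_map[new_r // base_height]
--         base_row = base_pattern[new_r % base_height]
--         row = []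
--         for c in range(map_width):
--             if map_row[c] == 'o':
--                 row.extend('o' if base_row[k] == 'o' else '.'
--                            for k in range(base_width))
--             else:
--                 row.extend(['.'] * base_width)
--         out.append(row)
--     return out
-- ===== Notes on version B (the rewrite author's own statement) =====
-- stated objective: alternative
-- what changed: B builds each output row directly in output order from new_r//base_height and new_r%base_height, appending base-width blocks per map cell, instead of allocating a dot-filled grid and patching tiles into it with nested index writes.
import Mathlib
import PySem

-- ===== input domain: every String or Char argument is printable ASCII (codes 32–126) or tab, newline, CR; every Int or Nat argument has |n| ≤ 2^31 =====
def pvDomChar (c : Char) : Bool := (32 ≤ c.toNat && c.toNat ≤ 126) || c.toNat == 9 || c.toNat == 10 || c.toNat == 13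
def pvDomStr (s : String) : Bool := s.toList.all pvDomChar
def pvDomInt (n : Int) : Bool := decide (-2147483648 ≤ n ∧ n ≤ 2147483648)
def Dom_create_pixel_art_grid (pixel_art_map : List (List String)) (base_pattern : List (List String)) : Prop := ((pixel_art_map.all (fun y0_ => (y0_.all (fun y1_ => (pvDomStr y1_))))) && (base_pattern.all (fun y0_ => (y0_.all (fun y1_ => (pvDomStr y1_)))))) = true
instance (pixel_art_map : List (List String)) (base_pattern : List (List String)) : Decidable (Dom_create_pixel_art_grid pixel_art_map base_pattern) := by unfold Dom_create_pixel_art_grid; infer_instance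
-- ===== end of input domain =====

-- B builds each output row directly in output order (row // base_height, row % base_height)
-- instead of patching tiles into a pre-allocated dot grid; alternative decomposition, same cost.

-- ===== PORT A =====
-- Literal port of A: allocate a '.'-filled grid, then for each alive map cell stamp the
-- base pattern's 'o' cells into the tile area by repeated in-place writes (List.set).
-- Python indexing m[i][j] is ported as getD; Pre_ restricts to inputs where Python's
-- indexing is in range, so the defaults are never consulted there.
def create_pixel_art_grid (pixel_art_map : List (List String)) (base_pattern : List (List String)) : List (List String) :=
  if base_pattern = [] ∨ base_pattern.headD [] = [] ∨ pixel_art_map = [] then []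
  else
    let bh := base_pattern.length
    let bw := (base_pattern.headD []).length
    let mh := pixel_art_map.length
    let mw := (pixel_art_map.headD []).length
    let g0 := (List.range (mh * bh)).map (fun _ => (List.range (mw * bw)).map (fun _ => "."))
    (List.range mh).foldl (fun g mr =>
      (List.range mw).foldl (fun g mc =>
        if ((pixel_art_map.getD mr []).getD mc "") == "o" then
          (List.range bh).foldl (fun g r =>
            (List.range bw).foldl (fun g c =>
              if ((base_pattern.getD r []).getD c "") == "o" then
                g.set (mr * bh + r) ((g.getD (mr * bh + r) []).set (mc * bw + c) "o")
              else g) g) g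
        else g) g) g0

-- ===== PORT B =====
-- Port of B: emit the rows in output order; each row is built left to right by appending
-- one base-width block per map cell.
def create_pixel_art_grid_alt (pixel_art_map : List (List String)) (base_pattern : List (List String)) : List (List String) :=
  if base_pattern = [] ∨ base_pattern.headD [] = [] ∨ pixel_art_map = [] then []
  else
    let bh := base_pattern.length
    let bw := (base_pattern.headD []).length
    let mw := (pixel_art_map.headD []).length
    (List.range (pixel_art_map.length * bh)).map (fun nr =>
      let mrow := pixel_art_map.getD (nr / bh) []
      let brow := base_pattern.getD (nr % bh) []
      (List.range mw).foldl (fun row c =>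
        if (mrow.getD c "") == "o" then
          row ++ (List.range bw).map (fun k => if (brow.getD k "") == "o" then "o" else ".")
        else
          row ++ (List.range bw).map (fun _ => ".")) [])

-- ===== PRECONDITION & SPEC =====
-- Pre_ excludes exactly the inputs on which the Python A raises IndexError (my Python B
-- raises there too): past the empty-input guard, a map row shorter than row 0's length,
-- or — when some alive map cell exists — a base row shorter than base row 0's length.
def Pre_create_pixel_art_grid (pixel_art_map : List (List String)) (base_pattern : List (List String)) : Prop :=
  (base_pattern ≠ [] ∧ base_pattern.headD [] ≠ [] ∧ pixel_art_map ≠ []) →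
    ((∀ row ∈ pixel_art_map, (pixel_art_map.headD []).length ≤ row.length) ∧
     ((∃ row ∈ pixel_art_map, ∃ c < (pixel_art_map.headD []).length, row.getD c "" = "o") →
        ∀ row ∈ base_pattern, (base_pattern.headD []).length ≤ row.length))
instance (pixel_art_map : List (List String)) (base_pattern : List (List String)) : Decidable (Pre_create_pixel_art_grid pixel_art_map base_pattern) := by unfold Pre_create_pixel_art_grid; infer_instance
def pvWitness_create_pixel_art_grid : List (List String) × List (List String) :=
  ([["o", "."], [".", "o"]], [["o", "."], ["o", "o"]])
def Spec_create_pixel_art_grid (pixel_art_map : List (List String)) (base_pattern : List (List String)) (out : List (List String)) : Prop := out = create_pixel_art_grid_alt pixel_art_map base_pattern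
instance (pixel_art_map : List (List String)) (base_pattern : List (List String)) (out : List (List String)) : Decidable (Spec_create_pixel_art_grid pixel_art_map base_pattern out) := by unfold Spec_create_pixel_art_grid; infer_instance

-- ===== CLAIM (what is proved, stated in full; the proofs are below) =====
def Claim_equal_create_pixel_art_grid : Prop := ∀ (pixel_art_map : List (List String)) (base_pattern : List (List String)), Dom_create_pixel_art_grid pixel_art_map base_pattern → Pre_create_pixel_art_grid pixel_art_map base_pattern → Spec_create_pixel_art_grid pixel_art_map base_pattern (create_pixel_art_grid pixel_art_map base_pattern)

-- ===== LEMMAS AND PROOFS =====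

-- Reading a cell of a grid, totalised with '.' (out of range reads '.').
def gCell (g : List (List String)) (r c : Nat) : String := (g.getD r []).getD c "."

-- The flattened index pairs of an n × m nested loop, in loop order.
def gridPairsD (n m : Nat) : List (Nat × Nat) :=
  (List.range n).flatMap (fun i => (List.range m).map (fun j => (i, j)))

lemma mem_gridPairsD (q : Nat × Nat) (n m : Nat) :
    q ∈ gridPairsD n m ↔ q.1 < n ∧ q.2 < m := by
  cases q with | mk a b => simp [gridPairsD, List.mem_flatMap, eq_comm]

lemma foldl_gridPairs2 {β : Type} (F : β → Nat → Nat → β) (b : β) (n m : Nat) :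
    (List.range n).foldl (fun b i => (List.range m).foldl (fun b j => F b i j) b) b
      = (gridPairsD n m).foldl (fun b q => F b q.1 q.2) b := by
  simp [gridPairsD, List.foldl_flatMap, List.foldl_map]

lemma getD_set_self {α : Type} (l : List α) (i : Nat) (v d : α) (h : i < l.length) :
    (l.set i v).getD i d = v := by
  rw [List.getD_eq_getElem _ _ (by simpa using h), List.getElem_set_self]

lemma getD_set_ne {α : Type} (l : List α) (i j : Nat) (v d : α) (h : i ≠ j) :
    (l.set i v).getD j d = l.getD j d := by
  rw [List.getD_eq_getElem?_getD, List.getElem?_set_ne h, ← List.getD_eq_getElem?_getD]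

lemma gCell_set (g : List (List String)) (a b r c : Nat)
    (ha : a < g.length) (hb : b < (g.getD a []).length) :
    gCell (g.set a ((g.getD a []).set b "o")) r c
      = if a = r ∧ b = c then "o" else gCell g r c := by
  unfold gCell
  by_cases hra : a = r
  · subst hra
    rw [getD_set_self _ _ _ _ ha]
    by_cases hcb : b = c
    · subst hcb
      rw [getD_set_self _ _ _ _ hb]
      simp
    · rw [getD_set_ne _ _ _ _ _ hcb, if_neg (fun h => hcb h.2)]
  · rw [getD_set_ne _ _ _ _ _ hra, if_neg (fun h => hra h.1)]

-- One pass of conditional single-cell writes, described pointwise.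
lemma setFold_spec {α : Type} (pos : α → Nat × Nat) (cond : α → Bool)
    (ps : List α) (g : List (List String)) (W : Nat)
    (hrow : ∀ row ∈ g, row.length = W)
    (hps : ∀ p ∈ ps, (pos p).1 < g.length ∧ (pos p).2 < W) :
    (ps.foldl (fun g p => if cond p then
        g.set (pos p).1 ((g.getD (pos p).1 []).set (pos p).2 "o") else g) g).length = g.length ∧
    (∀ row ∈ (ps.foldl (fun g p => if cond p then
        g.set (pos p).1 ((g.getD (pos p).1 []).set (pos p).2 "o") else g) g), row.length = W) ∧
    ∀ r c, gCell (ps.foldl (fun g p => if cond p then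
        g.set (pos p).1 ((g.getD (pos p).1 []).set (pos p).2 "o") else g) g) r c
      = if ps.any (fun p => cond p && ((pos p).1 == r) && ((pos p).2 == c)) then "o"
        else gCell g r c := by
  induction ps generalizing g with
  | nil => exact ⟨rfl, hrow, fun r c => by simp⟩
  | cons p ps ih =>
    have hp := hps p (List.mem_cons_self ..)
    have hps' : ∀ q ∈ ps, (pos q).1 < g.length ∧ (pos q).2 < W :=
      fun q hq => hps q (List.mem_cons_of_mem _ hq)
    have hmem : g.getD (pos p).1 [] ∈ g := by
      rw [List.getD_eq_getElem _ _ hp.1]; exact g.getElem_mem _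
    by_cases hc : cond p
    · have hfold : ((p :: ps).foldl (fun g p => if cond p then
          g.set (pos p).1 ((g.getD (pos p).1 []).set (pos p).2 "o") else g) g)
          = (ps.foldl (fun g p => if cond p then
          g.set (pos p).1 ((g.getD (pos p).1 []).set (pos p).2 "o") else g)
            (g.set (pos p).1 ((g.getD (pos p).1 []).set (pos p).2 "o"))) := by
        rw [List.foldl_cons, if_pos hc]
      have hlen1 : (g.set (pos p).1 ((g.getD (pos p).1 []).set (pos p).2 "o")).length = g.length :=
        List.length_set ..
      have hrow1 : ∀ row ∈ g.set (pos p).1 ((g.getD (pos p).1 []).set (pos p).2 "o"),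
          row.length = W := by
        intro row hr
        rcases List.mem_or_eq_of_mem_set hr with h | h
        · exact hrow row h
        · subst h; rw [List.length_set]; exact hrow _ hmem
      have hps1 : ∀ q ∈ ps,
          (pos q).1 < (g.set (pos p).1 ((g.getD (pos p).1 []).set (pos p).2 "o")).length ∧
          (pos q).2 < W := by
        intro q hq; rw [hlen1]; exact hps' q hq
      obtain ⟨ihl, ihr, ihc⟩ := ih _ hrow1 hps1
      refine ⟨by rw [hfold, ihl, hlen1], fun row hr => ihr row (hfold ▸ hr), fun r c => ?_⟩
      have hb : (pos p).2 < (g.getD (pos p).1 []).length := by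
        rw [hrow _ hmem]; exact hp.2
      rw [hfold, ihc r c, gCell_set g (pos p).1 (pos p).2 r c hp.1 hb, List.any_cons]
      by_cases h2 : ps.any (fun p => cond p && ((pos p).1 == r) && ((pos p).2 == c)) = true
      · simp [h2]
      · simp only [h2, Bool.or_false]
        by_cases h1 : (pos p).1 = r ∧ (pos p).2 = c
        · simp [hc, h1.1, h1.2]
        · have hfalse : (cond p && ((pos p).1 == r) && ((pos p).2 == c)) = false := by
            by_cases hx : (pos p).1 = r
            · have hy : (pos p).2 ≠ c := fun e => h1 ⟨hx, e⟩
              simp [hy]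
            · simp [hx]
          rw [hfalse, if_neg h1]
    · have hfold : ((p :: ps).foldl (fun g p => if cond p then
          g.set (pos p).1 ((g.getD (pos p).1 []).set (pos p).2 "o") else g) g)
          = (ps.foldl (fun g p => if cond p then
          g.set (pos p).1 ((g.getD (pos p).1 []).set (pos p).2 "o") else g) g) := by
        rw [List.foldl_cons, if_neg hc]
      obtain ⟨ihl, ihr, ihc⟩ := ih g hrow hps'
      refine ⟨hfold ▸ ihl, fun row hr => ihr row (hfold ▸ hr), fun r c => ?_⟩
      rw [hfold, ihc r c, List.any_cons]
      simp [hc]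

lemma gCell_g0 (H W r c : Nat) :
    gCell ((List.range H).map (fun _ => (List.range W).map (fun _ => ("." : String)))) r c = "." := by
  unfold gCell
  have h1 : ((List.range H).map (fun _ => (List.range W).map (fun _ => ("." : String))))
      = List.replicate H (List.replicate W ".") := by simp
  rw [h1]
  by_cases hr : r < H
  · rw [List.getD_eq_getElem (List.replicate H (List.replicate W ".")) [] (by simpa using hr),
      List.getElem_replicate]
    by_cases hc : c < W
    · rw [List.getD_eq_getElem _ _ (by simpa using hc), List.getElem_replicate]
    · rw [List.getD_eq_default _ _ (by simpa using Nat.le_of_not_lt hc)]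
  · rw [List.getD_eq_default (List.replicate H (List.replicate W ".")) [] (by simpa using Nat.le_of_not_lt hr)]
    rfl

lemma idx_div (bh mr i : Nat) (hi : i < bh) : (mr * bh + i) / bh = mr := by
  rw [Nat.mul_comm, Nat.mul_add_div (Nat.lt_of_le_of_lt (Nat.zero_le i) hi),
    Nat.div_eq_of_lt hi, Nat.add_zero]

lemma idx_mod (bh mr i : Nat) (hi : i < bh) : (mr * bh + i) % bh = i := by
  rw [Nat.mul_comm, Nat.mul_add_mod, Nat.mod_eq_of_lt hi]

lemma foldl_if_append (P : Nat → Bool) (X Y : List String) (l : List Nat) :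
    l.foldl (fun row c => if P c then row ++ X else row ++ Y) []
      = l.flatMap (fun c => if P c then X else Y) := by
  have h : (fun (row : List String) c => if P c then row ++ X else row ++ Y)
      = fun row c => row ++ (if P c then X else Y) := by
    funext row c; split <;> rfl
  rw [h, PySem.List.foldl_append_eq_flatMap]
  simp

lemma flatMap_blocks (f : Nat → Nat → String) (mw bw : Nat) :
    (List.range mw).flatMap (fun c => (List.range bw).map (f c))
      = (List.range (mw * bw)).map (fun k => f (k / bw) (k % bw)) := by
  induction mw with
  | zero => simp
  | succ n ih =>
    rw [List.range_succ, List.flatMap_append, ih, Nat.succ_mul, List.range_add,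
      List.map_append, List.map_map]
    congr 1
    simp only [List.flatMap_cons, List.flatMap_nil, List.append_nil]
    apply List.map_congr_left
    intro j hj
    rw [List.mem_range] at hj
    simp [Function.comp, idx_div bw n j hj, idx_mod bw n j hj]

-- The whole stamping phase of A, described cell by cell.
lemma stampAll_spec (m bp : List (List String)) (bh bw : Nat) (L : List (Nat × Nat))
    (g : List (List String)) (W : Nat)
    (hrow : ∀ row ∈ g, row.length = W)
    (hL : ∀ q ∈ L, (q.1 + 1) * bh ≤ g.length ∧ (q.2 + 1) * bw ≤ W) :
    (L.foldl (fun g q => if ((m.getD q.1 []).getD q.2 "") == "o" then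
        (gridPairsD bh bw).foldl (fun g p => if ((bp.getD p.1 []).getD p.2 "") == "o" then
          g.set (q.1 * bh + p.1) ((g.getD (q.1 * bh + p.1) []).set (q.2 * bw + p.2) "o") else g) g
      else g) g).length = g.length ∧
    (∀ row ∈ (L.foldl (fun g q => if ((m.getD q.1 []).getD q.2 "") == "o" then
        (gridPairsD bh bw).foldl (fun g p => if ((bp.getD p.1 []).getD p.2 "") == "o" then
          g.set (q.1 * bh + p.1) ((g.getD (q.1 * bh + p.1) []).set (q.2 * bw + p.2) "o") else g) g
      else g) g), row.length = W) ∧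
    ∀ r c, gCell (L.foldl (fun g q => if ((m.getD q.1 []).getD q.2 "") == "o" then
        (gridPairsD bh bw).foldl (fun g p => if ((bp.getD p.1 []).getD p.2 "") == "o" then
          g.set (q.1 * bh + p.1) ((g.getD (q.1 * bh + p.1) []).set (q.2 * bw + p.2) "o") else g) g
      else g) g) r c
      = if L.any (fun q => ((m.getD q.1 []).getD q.2 "") == "o" &&
          (gridPairsD bh bw).any (fun p => ((bp.getD p.1 []).getD p.2 "") == "o" &&
            (q.1 * bh + p.1 == r) && (q.2 * bw + p.2 == c))) then "o"
        else gCell g r c := by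
  induction L generalizing g with
  | nil => exact ⟨rfl, hrow, fun r c => by simp⟩
  | cons q L ih =>
    have hq := hL q (List.mem_cons_self ..)
    have hL' : ∀ q' ∈ L, (q'.1 + 1) * bh ≤ g.length ∧ (q'.2 + 1) * bw ≤ W :=
      fun q' h => hL q' (List.mem_cons_of_mem _ h)
    by_cases hc : ((m.getD q.1 []).getD q.2 "") == "o"
    · have hps : ∀ p ∈ gridPairsD bh bw,
          ((fun p => (q.1 * bh + p.1, q.2 * bw + p.2)) p).1 < g.length ∧
          ((fun p => (q.1 * bh + p.1, q.2 * bw + p.2)) p).2 < W := by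
        intro p hp
        rw [mem_gridPairsD] at hp
        have e1 : (q.1 + 1) * bh = q.1 * bh + bh := by ring
        have e2 : (q.2 + 1) * bw = q.2 * bw + bw := by ring
        constructor <;> simp only [] <;> omega
      have hstamp := setFold_spec (fun p => (q.1 * bh + p.1, q.2 * bw + p.2))
        (fun p => ((bp.getD p.1 []).getD p.2 "") == "o") (gridPairsD bh bw) g W hrow hps
      simp only [] at hstamp
      obtain ⟨hsl, hsr, hsc⟩ := hstamp
      have hL1 : ∀ q' ∈ L, (q'.1 + 1) * bh ≤
          ((gridPairsD bh bw).foldl (fun g p => if ((bp.getD p.1 []).getD p.2 "") == "o" then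
            g.set (q.1 * bh + p.1) ((g.getD (q.1 * bh + p.1) []).set (q.2 * bw + p.2) "o") else g) g).length ∧
          (q'.2 + 1) * bw ≤ W := by
        intro q' h; rw [hsl]; exact hL' q' h
      obtain ⟨ihl, ihr, ihc⟩ := ih _ hsr hL1
      have hfold : ((q :: L).foldl (fun g q => if ((m.getD q.1 []).getD q.2 "") == "o" then
          (gridPairsD bh bw).foldl (fun g p => if ((bp.getD p.1 []).getD p.2 "") == "o" then
            g.set (q.1 * bh + p.1) ((g.getD (q.1 * bh + p.1) []).set (q.2 * bw + p.2) "o") else g) g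
        else g) g) = (L.foldl (fun g q => if ((m.getD q.1 []).getD q.2 "") == "o" then
          (gridPairsD bh bw).foldl (fun g p => if ((bp.getD p.1 []).getD p.2 "") == "o" then
            g.set (q.1 * bh + p.1) ((g.getD (q.1 * bh + p.1) []).set (q.2 * bw + p.2) "o") else g) g
        else g) ((gridPairsD bh bw).foldl (fun g p => if ((bp.getD p.1 []).getD p.2 "") == "o" then
            g.set (q.1 * bh + p.1) ((g.getD (q.1 * bh + p.1) []).set (q.2 * bw + p.2) "o") else g) g)) := by
        rw [List.foldl_cons, if_pos hc]
      refine ⟨by rw [hfold, ihl, hsl], fun row hr => ihr row (hfold ▸ hr), fun r c => ?_⟩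
      rw [hfold, ihc r c, hsc r c, List.any_cons, hc]
      by_cases h2 : (L.any (fun q => ((m.getD q.1 []).getD q.2 "") == "o" &&
          (gridPairsD bh bw).any (fun p => ((bp.getD p.1 []).getD p.2 "") == "o" &&
            (q.1 * bh + p.1 == r) && (q.2 * bw + p.2 == c)))) = true
      · simp only [h2, Bool.true_and, Bool.or_true, if_pos h2]
        exact if_pos trivial
      · simp only [h2, Bool.true_and, Bool.or_false]
        rw [if_neg (Bool.false_ne_true)]
    · have hfold : ((q :: L).foldl (fun g q => if ((m.getD q.1 []).getD q.2 "") == "o" then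
          (gridPairsD bh bw).foldl (fun g p => if ((bp.getD p.1 []).getD p.2 "") == "o" then
            g.set (q.1 * bh + p.1) ((g.getD (q.1 * bh + p.1) []).set (q.2 * bw + p.2) "o") else g) g
        else g) g) = (L.foldl (fun g q => if ((m.getD q.1 []).getD q.2 "") == "o" then
          (gridPairsD bh bw).foldl (fun g p => if ((bp.getD p.1 []).getD p.2 "") == "o" then
            g.set (q.1 * bh + p.1) ((g.getD (q.1 * bh + p.1) []).set (q.2 * bw + p.2) "o") else g) g
        else g) g) := by
        rw [List.foldl_cons, if_neg (by simpa using hc)]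
      obtain ⟨ihl, ihr, ihc⟩ := ih g hrow hL'
      refine ⟨hfold ▸ ihl, fun row hr => ihr row (hfold ▸ hr), fun r c => ?_⟩
      rw [hfold, ihc r c, List.any_cons]
      have hbf : (((m.getD q.1 []).getD q.2 "") == "o") = false := by simpa using hc
      rw [hbf]
      simp only [Bool.false_and, Bool.false_or]

lemma cond_iff (alive bcell : Nat → Nat → Bool) (mh mw bh bw r c : Nat)
    (hr : r < mh * bh) (hc : c < mw * bw) :
    ((gridPairsD mh mw).any (fun q => alive q.1 q.2 &&
        (gridPairsD bh bw).any (fun p => bcell p.1 p.2 &&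
          (q.1 * bh + p.1 == r) && (q.2 * bw + p.2 == c))))
      = (alive (r / bh) (c / bw) && bcell (r % bh) (c % bw)) := by
  have hbh : 0 < bh := by
    rcases Nat.eq_zero_or_pos bh with h | h
    · rw [h, Nat.mul_zero] at hr; omega
    · exact h
  have hbw : 0 < bw := by
    rcases Nat.eq_zero_or_pos bw with h | h
    · rw [h, Nat.mul_zero] at hc; omega
    · exact h
  rw [Bool.eq_iff_iff]
  constructor
  · intro h
    simp only [List.any_eq_true, Bool.and_eq_true, beq_iff_eq] at h
    obtain ⟨q, hq, ha, p, hp, ⟨hb, e1⟩, e2⟩ := h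
    rw [mem_gridPairsD] at hq hp
    have d1 : r / bh = q.1 := by rw [← e1, idx_div _ _ _ hp.1]
    have d2 : r % bh = p.1 := by rw [← e1, idx_mod _ _ _ hp.1]
    have d3 : c / bw = q.2 := by rw [← e2, idx_div _ _ _ hp.2]
    have d4 : c % bw = p.2 := by rw [← e2, idx_mod _ _ _ hp.2]
    rw [Bool.and_eq_true, d1, d2, d3, d4]
    exact ⟨ha, hb⟩
  · intro h
    rw [Bool.and_eq_true] at h
    simp only [List.any_eq_true, Bool.and_eq_true, beq_iff_eq]
    refine ⟨(r / bh, c / bw), ?_, h.1, (r % bh, c % bw), ?_, ⟨h.2, ?_⟩, ?_⟩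
    · rw [mem_gridPairsD]
      exact ⟨(Nat.div_lt_iff_lt_mul hbh).mpr hr, (Nat.div_lt_iff_lt_mul hbw).mpr hc⟩
    · rw [mem_gridPairsD]
      exact ⟨Nat.mod_lt _ hbh, Nat.mod_lt _ hbw⟩
    · have := Nat.div_add_mod r bh
      rw [Nat.mul_comm (r / bh) bh]
      exact this
    · have := Nat.div_add_mod c bw
      rw [Nat.mul_comm (c / bw) bw]
      exact this

-- One row of B, as a map over the output column indices.
lemma rowB_eq (mrow brow : List String) (mw bw : Nat) :
    ((List.range mw).foldl (fun row c =>
        if (mrow.getD c "") == "o" then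
          row ++ (List.range bw).map (fun k => if (brow.getD k "") == "o" then "o" else ".")
        else
          row ++ (List.range bw).map (fun _ => ".")) [])
      = (List.range (mw * bw)).map (fun k =>
          if (mrow.getD (k / bw) "") == "o" && (brow.getD (k % bw) "") == "o" then "o" else ".") := by
  rw [foldl_if_append (fun c => (mrow.getD c "") == "o")]
  have hb : (fun c => if (mrow.getD c "") == "o" then
        (List.range bw).map (fun k => if (brow.getD k "") == "o" then "o" else ".")
      else (List.range bw).map (fun _ => ("." : String)))
      = fun c => (List.range bw).map (fun k =>
          if (mrow.getD c "") == "o" && (brow.getD k "") == "o" then "o" else ".") := by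
    funext c
    by_cases h : (mrow.getD c "") == "o"
    · simp only [h, if_pos rfl, Bool.true_and]
      rfl
    · have hf : ((mrow.getD c "") == "o") = false := by simpa using h
      rw [hf]
      simp
  rw [hb, flatMap_blocks]

-- ===== VERDICT (by name: the statement is the Claim_ definition above) =====
theorem create_pixel_art_grid_spec : Claim_equal_create_pixel_art_grid := by
  intro m bp _ _
  unfold Spec_create_pixel_art_grid
  rw [create_pixel_art_grid, create_pixel_art_grid_alt]
  by_cases hg : (bp = [] ∨ bp.headD [] = [] ∨ m = [])
  · rw [if_pos hg, if_pos hg]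
  · rw [if_neg hg, if_neg hg]
    simp only []
    push_neg at hg
    obtain ⟨h1, h2, h3⟩ := hg
    -- abbreviations
    have hA := stampAll_spec m bp bp.length (bp.headD []).length
      (gridPairsD m.length (m.headD []).length)
      ((List.range (m.length * bp.length)).map (fun _ =>
        (List.range ((m.headD []).length * (bp.headD []).length)).map (fun _ => ".")))
      ((m.headD []).length * (bp.headD []).length)
      (by
        intro row hr
        obtain ⟨_, _, hrow⟩ := List.mem_map.1 hr
        rw [← hrow, List.length_map, List.length_range])
      (by
        intro q hq
        rw [mem_gridPairsD] at hq
        rw [List.length_map, List.length_range]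
        exact ⟨Nat.mul_le_mul_right _ hq.1, Nat.mul_le_mul_right _ hq.2⟩)
    obtain ⟨hAl, hAr, hAc⟩ := hA
    -- rewrite A's nested loops into the pairs fold of stampAll_spec
    rw [foldl_gridPairs2 (fun (g : List (List String)) (mr mc : Nat) =>
      if ((m.getD mr []).getD mc "") == "o" then
        (List.range bp.length).foldl (fun g r =>
          (List.range (bp.headD []).length).foldl (fun g c =>
            if ((bp.getD r []).getD c "") == "o" then
              g.set (mr * bp.length + r) ((g.getD (mr * bp.length + r) []).set (mc * (bp.headD []).length + c) "o")
            else g) g) g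
      else g)]
    have hcongr :
        ((gridPairsD m.length (m.headD []).length).foldl
          (fun (b : List (List String)) (q : Nat × Nat) =>
            if ((m.getD q.1 []).getD q.2 "") == "o" then
              (List.range bp.length).foldl (fun g r =>
                (List.range (bp.headD []).length).foldl (fun g c =>
                  if ((bp.getD r []).getD c "") == "o" then
                    g.set (q.1 * bp.length + r) ((g.getD (q.1 * bp.length + r) []).set (q.2 * (bp.headD []).length + c) "o")
                  else g) g) b
            else b)
          ((List.range (m.length * bp.length)).map (fun _ =>
            (List.range ((m.headD []).length * (bp.headD []).length)).map (fun _ => "."))))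
        = ((gridPairsD m.length (m.headD []).length).foldl
          (fun (b : List (List String)) (q : Nat × Nat) =>
            if ((m.getD q.1 []).getD q.2 "") == "o" then
              (gridPairsD bp.length (bp.headD []).length).foldl (fun g p =>
                if ((bp.getD p.1 []).getD p.2 "") == "o" then
                  g.set (q.1 * bp.length + p.1) ((g.getD (q.1 * bp.length + p.1) []).set (q.2 * (bp.headD []).length + p.2) "o")
                else g) b
            else b)
          ((List.range (m.length * bp.length)).map (fun _ =>
            (List.range ((m.headD []).length * (bp.headD []).length)).map (fun _ => ".")))) := by
      apply PySem.List.foldl_congr_mem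
      intro acc q _
      by_cases hq : ((m.getD q.1 []).getD q.2 "") == "o"
      · rw [if_pos hq, if_pos hq,
          foldl_gridPairs2 (fun (g : List (List String)) (r c : Nat) =>
            if ((bp.getD r []).getD c "") == "o" then
              g.set (q.1 * bp.length + r) ((g.getD (q.1 * bp.length + r) []).set (q.2 * (bp.headD []).length + c) "o")
            else g)]
      · rw [if_neg hq, if_neg hq]
    rw [hcongr]
    -- now both sides cell by cell
    apply List.ext_getElem
    · rw [hAl, List.length_map, List.length_range, List.length_map, List.length_range]
    · intro nr hnr hnr'
      have hnrH : nr < m.length * bp.length := by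
        rw [List.length_map, List.length_range] at hnr'
        exact hnr'
      -- the B row
      rw [List.getElem_map, List.getElem_range]
      rw [rowB_eq]
      -- the A row, element by element
      apply List.ext_getElem
      · rw [hAr _ (List.getElem_mem hnr), List.length_map, List.length_range]
      · intro k hk hk'
        have hkW : k < (m.headD []).length * (bp.headD []).length := by
          rw [List.length_map, List.length_range] at hk'
          exact hk'
        rw [List.getElem_map, List.getElem_range]
        have hcell : gCell ((gridPairsD m.length (m.headD []).length).foldl (fun g q =>
            if ((m.getD q.1 []).getD q.2 "") == "o" then
              (gridPairsD bp.length (bp.headD []).length).foldl (fun g p =>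
                if ((bp.getD p.1 []).getD p.2 "") == "o" then
                  g.set (q.1 * bp.length + p.1) ((g.getD (q.1 * bp.length + p.1) []).set (q.2 * (bp.headD []).length + p.2) "o")
                else g) g
            else g)
            ((List.range (m.length * bp.length)).map (fun _ =>
              (List.range ((m.headD []).length * (bp.headD []).length)).map (fun _ => ".")))) nr k
            = if ((m.getD (nr / bp.length) []).getD (k / (bp.headD []).length) "") == "o" &&
                ((bp.getD (nr % bp.length) []).getD (k % (bp.headD []).length) "") == "o"
              then "o" else "." := by
          rw [hAc nr k,
            cond_iff (fun a b => ((m.getD a []).getD b "") == "o")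
              (fun a b => ((bp.getD a []).getD b "") == "o")
              m.length (m.headD []).length bp.length (bp.headD []).length nr k hnrH hkW,
            gCell_g0]
        rw [gCell, List.getD_eq_getElem _ _ hnr] at hcell
        rw [List.getD_eq_getElem _ _ hk] at hcell
        exact hcell
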